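-- pv_equiv track=rewrite | github.com/rladygks329/algorithm | baekjoon/1059.py | solve
-- ===== SOURCE A (Python) =====
-- def solve(arr, target):
--
--     if target in arr:
--         return 0
--
--     arr.sort()
--     prev, next = 0, 0
--
--     for d in arr:
--         if d > target:
--             next = d
--             break
--         prev = d
--
--     return (target - prev) * (next - target) - 1
-- ===== SOURCE B (Python) =====
-- def solve(arr, target):
--     lo = hi = None
--     for d in arr:
--         if d == target:
--             return 0
--         if d < target:
--             if lo is None or d > lo:
--                 lo = d
--         else:
--             if hi is None or d < hi:
--                 hi = d
--     return (target - (lo if lo is not None else 0)) * ((hi if hi is not None else 0) - target) - 1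
-- ===== Notes on version B (the rewrite author's own statement) =====
-- stated objective: alternative
-- what changed: Replaces sort-then-scan with a single linear pass that tracks the maximum element below target and the minimum element above target (returning 0 early on a hit).
import Mathlib
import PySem

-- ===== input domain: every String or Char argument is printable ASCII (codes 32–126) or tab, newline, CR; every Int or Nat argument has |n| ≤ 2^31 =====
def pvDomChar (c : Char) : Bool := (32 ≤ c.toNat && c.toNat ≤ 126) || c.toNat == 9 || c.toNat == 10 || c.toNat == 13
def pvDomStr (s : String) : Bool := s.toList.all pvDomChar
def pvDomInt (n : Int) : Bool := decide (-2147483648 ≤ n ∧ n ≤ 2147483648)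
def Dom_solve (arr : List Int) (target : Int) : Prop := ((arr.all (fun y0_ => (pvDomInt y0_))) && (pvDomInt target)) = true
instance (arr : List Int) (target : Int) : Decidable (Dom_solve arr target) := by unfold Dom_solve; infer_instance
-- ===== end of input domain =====

-- B replaces A's sort-then-scan with a single linear pass tracking the max element
-- below target and the min element above target (objective: an alternative
-- O(n) algorithm in place of A's O(n log n) sort-based one).
-- A sorts `arr` in place, B does not; the equivalence proved here is about the RETURN value only.

-- ===== PORT A =====
-- A's for-loop with break: prev/next accumulators, break on the first d > target
def solveLoop (target : Int) : List Int → Int → Int → Int × Int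
  | [], prev, next => (prev, next)
  | d :: rest, prev, next =>
      if d > target then (prev, d) else solveLoop target rest d next

def solve (arr : List Int) (target : Int) : Int :=
  if arr.contains target then 0
  else
    let s := PySem.List.sorted arr (fun x => x) false
    let pn := solveLoop target s 0 0
    (target - pn.1) * (pn.2 - target) - 1

-- ===== PORT B =====
-- B's single pass: lo = max element < target so far, hi = min element > target so far
-- (None modelled as Option), early return 0 when d == target
def altLoop (target : Int) : List Int → Option Int → Option Int → Int
  | [], lo, hi => (target - lo.getD 0) * (hi.getD 0 - target) - 1
  | d :: rest, lo, hi =>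
      if d = target then 0
      else if d < target then
        altLoop target rest (some (match lo with | none => d | some l => if d > l then d else l)) hi
      else
        altLoop target rest lo (some (match hi with | none => d | some h => if d < h then d else h))

def solve_alt (arr : List Int) (target : Int) : Int :=
  altLoop target arr none none

-- ===== PRECONDITION & SPEC =====
def Spec_solve (arr : List Int) (target : Int) (out : Int) : Prop := out = solve_alt arr target
instance (arr : List Int) (target : Int) (out : Int) : Decidable (Spec_solve arr target out) := by unfold Spec_solve; infer_instance

-- ===== CLAIM (what is proved, stated in full; the proofs are below) =====
def Claim_equal_solve : Prop := ∀ (arr : List Int) (target : Int), Dom_solve arr target → Spec_solve arr target (solve arr target)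

-- ===== LEMMAS AND PROOFS =====

-- B returns 0 as soon as it meets target
theorem altLoop_mem (target : Int) (xs : List Int) (lo hi : Option Int)
    (h : target ∈ xs) : altLoop target xs lo hi = 0 := by
  induction xs generalizing lo hi with
  | nil => cases h
  | cons d rest ih =>
    simp only [altLoop]
    rcases List.mem_cons.mp h with h | h
    · simp [h.symm]
    · split_ifs <;> simp [ih _ _ h]

-- A's loop on a sorted, target-free list computes (max of the part below target,
-- min of the part above target), with the initial accumulators as defaults
theorem solveLoop_sorted (target : Int) (s : List Int)
    (hs : s.Pairwise (fun a b => a ≤ b)) (hm : target ∉ s) (p n : Int) :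
    solveLoop target s p n =
      (((s.filter (fun d => d < target)).max?).getD p,
       ((s.filter (fun d => target < d)).min?).getD n) := by
  induction s generalizing p with
  | nil => rfl
  | cons d rest ih =>
    have hd : ∀ b ∈ rest, d ≤ b := by
      intro b hb; exact (List.pairwise_cons.mp hs).1 b hb
    have hrest := (List.pairwise_cons.mp hs).2
    have hmr : target ∉ rest := fun h => hm (by simp [h])
    have hne : d ≠ target := fun h => hm (by simp [h])
    by_cases hgt : d > target
    · -- break: everything from here is > target
      have hfe : rest.filter (fun x => decide (x < target)) = [] := by
        apply List.filter_eq_nil_iff.mpr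
        intro b hb
        simp only [decide_eq_true_eq]
        exact fun hlt => absurd (lt_of_le_of_lt (hd b hb) hlt) (not_lt.mpr (le_of_lt hgt))
      have hfa : ∀ b ∈ rest.filter (fun x => decide (target < x)), d ≤ b := by
        intro b hb; exact hd b (List.mem_of_mem_filter hb)
      simp only [solveLoop, if_pos hgt, List.filter_cons,
        decide_eq_true_eq, if_neg (not_lt.mpr (le_of_lt hgt)), hfe, Prod.mk.injEq]
      refine ⟨rfl, ?_⟩
      rw [List.min?_cons]
      cases hmo : (rest.filter (fun x => decide (target < x))).min? with
      | none => rfl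
      | some m =>
        have hm' : m ∈ rest.filter (fun x => decide (target < x)) :=
          (List.min?_eq_some_iff.mp hmo).1
        simp [Option.elim, min_eq_left (hfa m hm')]
    · have hdt : d < target := lt_of_le_of_ne (not_lt.mp hgt) hne
      rw [solveLoop, if_neg hgt, ih hrest hmr d]
      simp only [List.filter_cons, decide_eq_true_eq, if_pos hdt,
        if_neg (not_lt.mpr (le_of_lt hdt)), Prod.mk.injEq]
      refine ⟨?_, trivial⟩
      rw [List.max?_cons]
      cases hmo : (rest.filter (fun x => decide (x < target))).max? with
      | none => rfl
      | some m =>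
        have hm' : m ∈ rest.filter (fun x => decide (x < target)) :=
          (List.max?_eq_some_iff.mp hmo).1
        have : d ≤ m := hd m (List.mem_of_mem_filter hm')
        simp [Option.elim, max_eq_right this]

-- running-max accumulator of B's loop, as a fold (definitionally B's lo updates)
def loAcc (target : Int) (xs : List Int) (lo : Option Int) : Option Int :=
  xs.foldl (fun acc d => if d < target then
      some (match acc with | none => d | some l => if d > l then d else l) else acc) lo

def hiAcc (target : Int) (xs : List Int) (hi : Option Int) : Option Int :=
  xs.foldl (fun acc d => if target < d then
      some (match acc with | none => d | some h => if d < h then d else h) else acc) hi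

-- B's loop, when target is absent, returns the formula over its two accumulators
theorem altLoop_not_mem (target : Int) (xs : List Int) (lo hi : Option Int)
    (h : target ∉ xs) :
    altLoop target xs lo hi =
      (target - (loAcc target xs lo).getD 0) * ((hiAcc target xs hi).getD 0 - target) - 1 := by
  induction xs generalizing lo hi with
  | nil => rfl
  | cons d rest ih =>
    have hne : d ≠ target := fun hdt => h (by simp [hdt])
    have hr : target ∉ rest := fun hm => h (by simp [hm])
    by_cases hlt : d < target
    · simp only [altLoop, if_neg hne, loAcc, hiAcc, List.foldl_cons,
        if_pos hlt, if_neg (not_lt.mpr (le_of_lt hlt))]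
      exact ih _ _ hr
    · have hgt : target < d := lt_of_le_of_ne (not_lt.mp hlt) (Ne.symm hne)
      simp only [altLoop, if_neg hne, loAcc, hiAcc, List.foldl_cons,
        if_neg hlt, if_pos hgt]
      exact ih _ _ hr

-- with some accumulator, loAcc is the running max over the filtered list
theorem loAcc_some (target : Int) (xs : List Int) (l : Int) :
    loAcc target xs (some l) = some ((xs.filter (fun d => d < target)).foldl max l) := by
  induction xs generalizing l with
  | nil => rfl
  | cons d rest ih =>
    by_cases hlt : d < target
    · have : (if d > l then d else l) = max l d := by
        rw [max_def]; split_ifs <;> omega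
      simp only [loAcc, List.foldl_cons, if_pos hlt, List.filter_cons,
        decide_eq_true_eq, this]
      exact ih (max l d)
    · simp only [loAcc, List.foldl_cons, if_neg hlt, List.filter_cons,
        decide_eq_true_eq]
      exact ih l

theorem hiAcc_some (target : Int) (xs : List Int) (h0 : Int) :
    hiAcc target xs (some h0) = some ((xs.filter (fun d => target < d)).foldl min h0) := by
  induction xs generalizing h0 with
  | nil => rfl
  | cons d rest ih =>
    by_cases hgt : target < d
    · have : (if d < h0 then d else h0) = min h0 d := by
        rw [min_def]; split_ifs <;> omega
      simp only [hiAcc, List.foldl_cons, if_pos hgt, List.filter_cons,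
        decide_eq_true_eq, this]
      exact ih (min h0 d)
    · simp only [hiAcc, List.foldl_cons, if_neg hgt, List.filter_cons,
        decide_eq_true_eq]
      exact ih h0

-- from none, the accumulators compute max?/min? of the filtered list
theorem foldl_max_of_max? (fr : List Int) (m : Int) (h : fr.max? = some m) :
    ∀ a : Int, fr.foldl max a = max a m := by
  induction fr generalizing m with
  | nil => simp at h
  | cons x t ih =>
    intro a
    rw [List.max?_cons] at h
    cases hto : t.max? with
    | none =>
      have ht : t = [] := List.max?_eq_none_iff.mp hto
      rw [hto] at h
      simp only [Option.elim] at h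
      injection h with hx
      simp [ht, hx]
    | some mt =>
      rw [hto] at h
      simp only [Option.elim] at h
      injection h with hx
      simp only [List.foldl_cons, ih mt hto (max a x), ← hx, max_assoc]

theorem foldl_min_of_min? (fr : List Int) (m : Int) (h : fr.min? = some m) :
    ∀ a : Int, fr.foldl min a = min a m := by
  induction fr generalizing m with
  | nil => simp at h
  | cons x t ih =>
    intro a
    rw [List.min?_cons] at h
    cases hto : t.min? with
    | none =>
      have ht : t = [] := List.min?_eq_none_iff.mp hto
      rw [hto] at h
      simp only [Option.elim] at h
      injection h with hx
      simp [ht, hx]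
    | some mt =>
      rw [hto] at h
      simp only [Option.elim] at h
      injection h with hx
      simp only [List.foldl_cons, ih mt hto (min a x), ← hx, min_assoc]

-- from none, the accumulators compute max?/min? of the filtered list
theorem loAcc_none (target : Int) (xs : List Int) :
    loAcc target xs none = (xs.filter (fun d => d < target)).max? := by
  induction xs with
  | nil => rfl
  | cons d rest ih =>
    by_cases hlt : d < target
    · rw [show loAcc target (d :: rest) none = loAcc target rest (some d) by
        simp [loAcc, hlt]]
      rw [loAcc_some]
      simp only [List.filter_cons, decide_eq_true_eq, if_pos hlt]
      rw [List.max?_cons]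
      cases hmo : (rest.filter (fun x => decide (x < target))).max? with
      | none =>
        have : rest.filter (fun x => decide (x < target)) = [] :=
          List.max?_eq_none_iff.mp hmo
        simp [this]
      | some m => simp [Option.elim, foldl_max_of_max? _ m hmo d]
    · simp only [loAcc, List.foldl_cons, if_neg hlt, List.filter_cons,
        decide_eq_true_eq]
      exact ih

theorem hiAcc_none (target : Int) (xs : List Int) :
    hiAcc target xs none = (xs.filter (fun d => target < d)).min? := by
  induction xs with
  | nil => rfl
  | cons d rest ih =>
    by_cases hgt : target < d
    · rw [show hiAcc target (d :: rest) none = hiAcc target rest (some d) by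
        simp [hiAcc, hgt]]
      rw [hiAcc_some]
      simp only [List.filter_cons, decide_eq_true_eq, if_pos hgt]
      rw [List.min?_cons]
      cases hmo : (rest.filter (fun x => decide (target < x))).min? with
      | none =>
        have : rest.filter (fun x => decide (target < x)) = [] :=
          List.min?_eq_none_iff.mp hmo
        simp [this]
      | some m => simp [Option.elim, foldl_min_of_min? _ m hmo d]
    · simp only [hiAcc, List.foldl_cons, if_neg hgt, List.filter_cons,
        decide_eq_true_eq]
      exact ih

-- max?/min? are invariant under permutation (over Int)
theorem max?_perm (xs ys : List Int) (h : xs.Perm ys) : xs.max? = ys.max? := by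
  cases hx : xs.max? with
  | none =>
    have := List.max?_eq_none_iff.mp hx
    subst this
    simp [List.Perm.nil_eq h |>.symm]
  | some m =>
    obtain ⟨hmem, hle⟩ := List.max?_eq_some_iff.mp hx
    symm
    rw [List.max?_eq_some_iff]
    exact ⟨h.mem_iff.mp hmem, fun b hb => hle b (h.mem_iff.mpr hb)⟩

theorem min?_perm (xs ys : List Int) (h : xs.Perm ys) : xs.min? = ys.min? := by
  cases hx : xs.min? with
  | none =>
    have := List.min?_eq_none_iff.mp hx
    subst this
    simp [List.Perm.nil_eq h |>.symm]
  | some m =>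
    obtain ⟨hmem, hle⟩ := List.min?_eq_some_iff.mp hx
    symm
    rw [List.min?_eq_some_iff]
    exact ⟨h.mem_iff.mp hmem, fun b hb => hle b (h.mem_iff.mpr hb)⟩

-- ===== VERDICT (by name: the statement is the Claim_ definition above) =====
theorem solve_spec : Claim_equal_solve := by
  intro arr target _
  unfold Spec_solve solve solve_alt
  by_cases hmem : target ∈ arr
  · rw [if_pos (List.contains_iff_mem.mpr hmem), altLoop_mem _ _ _ _ hmem]
  · rw [if_neg (by simpa using hmem)]
    have hperm := PySem.List.sorted_perm arr (fun x => x) false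
    have hpw : (PySem.List.sorted arr (fun x => x) false).Pairwise (fun a b => a ≤ b) :=
      PySem.List.sorted_pairwise arr (fun x => x)
    have hnm : target ∉ PySem.List.sorted arr (fun x => x) false := by
      rw [PySem.List.mem_sorted]; exact hmem
    rw [altLoop_not_mem _ _ _ _ hmem, loAcc_none, hiAcc_none]
    simp only [solveLoop_sorted target _ hpw hnm 0 0]
    rw [max?_perm _ _ (hperm.filter _), min?_perm _ _ (hperm.filter _)]
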